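-- pv_equiv track=rewrite | github.com/annaulazar/algorithms_practice | Ozon_otbor/task_9_b.py | check_reverse
-- ===== SOURCE A (Python) =====
-- def check_reverse(queue):
--     x, y = 0, 0
--     for i in range(len(queue) - 1, -1, -1):
--         if queue[i] == "X":
--             x += 1
--         elif queue[i] == "Y" or queue[i] == "Z":
--             y += 1
--         if x > y:
--             return False
--     return True
-- ===== SOURCE B (Python) =====
-- def check_reverse(queue):
--     # Forward pass: the suffix starting at i has more X's than Y/Z's iff
--     # total_delta > prefix_delta(i); so the check holds iff the total delta
--     # is <= the minimum prefix delta over prefixes of length 0..len-1.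
--     prefix, low = 0, 0
--     for c in queue:
--         low = min(low, prefix)
--         prefix += (c == "X") - (c in ("Y", "Z"))
--     return prefix <= low
-- ===== Notes on version B (the rewrite author's own statement) =====
-- stated objective: alternative
-- what changed: Replaces A's backward two-counter scan with early return by a forward single pass that computes the total signed delta and the minimum prefix delta, returning total <= min-prefix (a suffix has more X than Y/Z iff total exceeds some prefix sum).
import Mathlib
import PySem

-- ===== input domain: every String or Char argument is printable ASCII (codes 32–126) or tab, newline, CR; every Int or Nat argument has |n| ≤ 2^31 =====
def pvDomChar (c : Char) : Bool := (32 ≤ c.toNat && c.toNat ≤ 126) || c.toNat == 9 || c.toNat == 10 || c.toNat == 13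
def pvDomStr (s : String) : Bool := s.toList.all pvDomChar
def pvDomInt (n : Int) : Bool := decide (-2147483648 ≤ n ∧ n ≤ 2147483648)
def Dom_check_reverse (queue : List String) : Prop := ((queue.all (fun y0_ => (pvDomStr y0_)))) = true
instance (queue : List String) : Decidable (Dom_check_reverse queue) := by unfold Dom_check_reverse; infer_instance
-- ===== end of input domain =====

-- B replaces A's backward two-counter early-return scan by a forward pass computing the
-- total signed delta and the minimum prefix delta, then one final comparison; same cost.

-- ===== PORT A =====
-- the for-loop over range(len(queue)-1, -1, -1) with counters x, y and early return False
def check_reverse_loop (queue : List String) (x y : Int) : List Int → Bool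
  | [] => true
  | i :: rest =>
    let q := PySem.List.pyGetD queue i ""   -- queue[i]; every i produced by the range is in bounds
    let x' := if q = "X" then x + 1 else x
    let y' := if q ≠ "X" ∧ (q = "Y" ∨ q = "Z") then y + 1 else y
    if x' > y' then false
    else check_reverse_loop queue x' y' rest

def check_reverse (queue : List String) : Bool :=
  check_reverse_loop queue 0 0 (PySem.List.pyRange ((queue.length : Int) - 1) (-1) (-1))

-- ===== PORT B =====
-- Source B: one forward pass over queue with state (prefix, low); low = min of prefix sums so far
def pvStepB (acc : Int × Int) (c : String) : Int × Int :=
  (acc.1 + ((if c = "X" then (1 : Int) else 0) - (if c = "Y" ∨ c = "Z" then 1 else 0)),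
   min acc.2 acc.1)

def check_reverse_alt (queue : List String) : Bool :=
  let p := queue.foldl pvStepB (0, 0)
  decide (p.1 ≤ p.2)

-- ===== PRECONDITION & SPEC =====
def Spec_check_reverse (queue : List String) (out : Bool) : Prop := out = check_reverse_alt queue
instance (queue : List String) (out : Bool) : Decidable (Spec_check_reverse queue out) := by unfold Spec_check_reverse; infer_instance

-- ===== CLAIM (what is proved, stated in full; the proofs are below) =====
def Claim_equal_check_reverse : Prop := ∀ (queue : List String), Dom_check_reverse queue → Spec_check_reverse queue (check_reverse queue)

-- ===== LEMMAS AND PROOFS =====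

-- the signed delta of one character
def pvDelta (c : String) : Int :=
  (if c = "X" then (1 : Int) else 0) - (if c = "Y" ∨ c = "Z" then 1 else 0)

-- total delta and prefix delta
def pvS (l : List String) : Int := (l.map pvDelta).sum
def pvP (i : Nat) (l : List String) : Int := ((l.take i).map pvDelta).sum

-- reference evaluator: early-exit scan with a single signed balance
def pvOk : List String → Int → Bool
  | [], _ => true
  | c :: rest, s =>
    let s' := s + pvDelta c
    if 0 < s' then false else pvOk rest s'

theorem pvOk_append (m : List String) : ∀ (s : Int) (c : String),
    pvOk (m ++ [c]) s = (pvOk m s && decide (s + pvS m + pvDelta c ≤ 0)) := by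
  induction m with
  | nil =>
    intro s c
    by_cases h : 0 < s + pvDelta c <;> simp [pvOk, pvS, h] <;> omega
  | cons c' rest ih =>
    intro s c
    by_cases h : 0 < s + pvDelta c'
    · simp [pvOk, h]
    · simp only [List.cons_append, pvOk, if_neg h, ih]
      congr 1
      simp [pvS]
      omega

theorem A_suffix (l : List String) : ∀ s : Int,
    pvOk l.reverse s = decide (∀ i < l.length, s + pvS (l.drop i) ≤ 0) := by
  induction l with
  | nil => intro s; simp [pvOk]
  | cons c rest ih =>
    intro s
    rw [List.reverse_cons, pvOk_append, ih]
    have hS : pvS rest.reverse = pvS rest := by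
      simp [pvS]
    rw [hS, Bool.eq_iff_iff]
    simp only [Bool.and_eq_true, decide_eq_true_eq]
    constructor
    · rintro ⟨hrest, h0⟩ i hi
      cases i with
      | zero => simp [pvS] at h0 ⊢; omega
      | succ j =>
        have := hrest j (by simpa using hi)
        simpa using this
    · intro h
      refine ⟨?_, ?_⟩
      · intro j hj
        have := h (j + 1) (by simpa using hj)
        simpa using this
      · have := h 0 (by simp)
        simp [pvS] at this ⊢
        omega

theorem Bfold_le_iff (l : List String) : ∀ (p low : Int),
    ((l.foldl pvStepB (p, low)).1 ≤ (l.foldl pvStepB (p, low)).2) ↔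
      (p + pvS l ≤ low ∧ ∀ i < l.length, p + pvS l ≤ p + pvP i l) := by
  induction l with
  | nil =>
    intro p low
    simp [pvS]
  | cons c rest ih =>
    intro p low
    have hstep : pvStepB (p, low) c = (p + pvDelta c, min low p) := by
      simp [pvStepB, pvDelta]
    rw [List.foldl_cons, hstep, ih]
    have hS : pvS (c :: rest) = pvDelta c + pvS rest := by simp [pvS]
    constructor
    · rintro ⟨h0, hrest⟩
      rw [le_min_iff] at h0
      refine ⟨by rw [hS]; omega, ?_⟩
      intro i hi
      cases i with
      | zero => simp [pvP, hS]; omega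
      | succ j =>
        have := hrest j (by simpa using hi)
        simp [pvP, hS] at this ⊢
        omega
    · rintro ⟨h0, hrest⟩
      have h1 := hrest 0 (by simp)
      simp [pvP, hS] at h1
      rw [hS] at h0
      refine ⟨le_min_iff.mpr ⟨by omega, by omega⟩, ?_⟩
      intro j hj
      have := hrest (j + 1) (by simpa using hj)
      simp [pvP, hS] at this ⊢
      omega

theorem pvP_add_drop (l : List String) (i : Nat) : pvP i l + pvS (l.drop i) = pvS l := by
  conv_rhs => rw [show l = l.take i ++ l.drop i by simp]
  simp [pvP, pvS]

theorem alt_eq (queue : List String) :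
    check_reverse_alt queue = decide (∀ i < queue.length, (0 : Int) + pvS (queue.drop i) ≤ 0) := by
  simp only [check_reverse_alt]
  rw [decide_eq_decide, Bfold_le_iff]
  constructor
  · rintro ⟨h0, hrest⟩ i hi
    have hp := pvP_add_drop queue i
    have := hrest i hi
    omega
  · intro h
    constructor
    · cases queue with
      | nil => simp [pvS]
      | cons c rest =>
        have := h 0 (by simp)
        simpa using this
    · intro i hi
      have hp := pvP_add_drop queue i
      have := h i hi
      omega

-- the loop ignores an appended tail when every index is inside the prefix
theorem loop_append (is : List Int) : ∀ (l t : List String) (x y : Int),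
    (∀ i ∈ is, 0 ≤ i ∧ i < (l.length : Int)) →
    check_reverse_loop (l ++ t) x y is = check_reverse_loop l x y is := by
  induction is with
  | nil => intro l t x y _; rfl
  | cons i rest ih =>
    intro l t x y h
    have hi := h i (by simp)
    have hget : PySem.List.pyGetD (l ++ t) i "" = PySem.List.pyGetD l i "" := by
      rw [PySem.List.pyGetD_eq_getElem _ _ hi.1 (by simp; omega),
          PySem.List.pyGetD_eq_getElem _ _ hi.1 hi.2]
      rw [List.getElem_append_left (by omega)]
    simp only [check_reverse_loop, hget]
    exact if_congr Iff.rfl rfl (ih l t _ _ (fun j hj => h j (List.mem_cons_of_mem _ hj)))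

theorem loopA (r : List String) : ∀ (x y : Int),
    check_reverse_loop r.reverse x y (PySem.List.pyRange ((r.length : Int) - 1) (-1) (-1))
      = pvOk r (x - y) := by
  induction r with
  | nil =>
    intro x y
    rw [show ((([] : List String).length : Int) - 1) = -1 by simp,
        PySem.List.pyRange_neg_one_eq_nil (by omega)]
    rfl
  | cons c rest ih =>
    intro x y
    have hlen : ((c :: rest).length : Int) - 1 = (rest.length : Int) := by simp
    rw [hlen, PySem.List.pyRange_neg_one_cons (by omega)]
    simp only [check_reverse_loop, List.reverse_cons]
    have hget : PySem.List.pyGetD (rest.reverse ++ [c]) (rest.length : Int) "" = c := by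
      rw [PySem.List.pyGetD_eq_getElem _ _ (by omega) (by simp)]
      simp
    rw [hget]
    have htail : ∀ x' y' : Int,
        check_reverse_loop (rest.reverse ++ [c]) x' y'
          (PySem.List.pyRange ((rest.length : Int) - 1) (-1) (-1))
        = pvOk rest (x' - y') := by
      intro x' y'
      rw [loop_append _ rest.reverse [c] x' y' (by
        intro i hi
        rw [PySem.List.mem_pyRange_neg_one] at hi
        simp
        omega)]
      exact ih x' y'
    by_cases hX : c = "X"
    · subst hX
      by_cases hgt : x + 1 > y
      · simp [hgt, pvOk, pvDelta]
        omega
      · simp [hgt, htail, pvOk, pvDelta]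
        rw [show (decide (y ≤ x)) = false by simp; omega]
        simp
        congr 1
        omega
    · by_cases hYZ : c = "Y" ∨ c = "Z"
      · rcases hYZ with hc | hc <;> subst hc <;>
        · by_cases hgt : x > y + 1
          · simp [hgt, pvOk, pvDelta]
            omega
          · simp [hgt, htail, pvOk, pvDelta]
            rw [show (decide (1 < x - y)) = false by simp; omega]
            simp
            congr 1
            omega
      · by_cases hgt : x > y
        · simp [hX, hYZ, hgt, pvOk, pvDelta]
        · simp [hX, hYZ, hgt, htail, pvOk, pvDelta]

-- ===== VERDICT (by name: the statement is the Claim_ definition above) =====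
theorem check_reverse_spec : Claim_equal_check_reverse := by
  intro queue _
  unfold Spec_check_reverse
  rw [alt_eq, ← A_suffix]
  have := loopA queue.reverse 0 0
  rw [List.reverse_reverse, List.length_reverse] at this
  simpa [check_reverse] using this
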